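-- pv_equiv track=rewrite | github.com/Foodly-GE/live-campaigns-changelog | backend/services/calendar.py | aggregate_banners_by_date
-- ===== SOURCE A (Python) =====
-- from typing import Dict, List, Any, Optional
--
-- def aggregate_banners_by_date(
--     changelog_entries: List[Dict[str, Any]]
-- ) -> Dict[str, Dict[str, int]]:
--     """
--     Aggregate banner actions by date for time series.
--
--     Args:
--         changelog_entries: List of changelog entries
--
--     Returns:
--         Dict of date -> {banner_action: count}
--     """
--     from collections import defaultdict
--
--     result = defaultdict(lambda: {'banner-start': 0, 'banner-update': 0, 'banner-end': 0})
--
--     for entry in changelog_entries: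
--         date = entry.get('date')
--         banner_action = entry.get('banner_action')
--
--         if date and banner_action:
--             result[date][banner_action] += 1
--
--     return dict(result)
-- ===== SOURCE B (Python) =====
-- def aggregate_banners_by_date(changelog_entries):
--     # Staged pipeline: project to (date, action) pairs, keep the truthy ones,
--     # list distinct dates in first-appearance order, then count per date by scanning.
--     pairs = [(e.get('date'), e.get('banner_action')) for e in changelog_entries]
--     pairs = [p for p in pairs if p[0] and p[1]]
--     dates = list(dict.fromkeys(d for d, _ in pairs))
--     result = {}
--     for d in dates:
--         acts = [a for d2, a in pairs if d2 == d]
--         result[d] = {k: acts.count(k)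
--                      for k in ('banner-start', 'banner-update', 'banner-end')}
--     return result
-- ===== Notes on version B (the rewrite author's own statement) =====
-- stated objective: alternative
-- what changed: Replaces A's single-pass defaultdict increment with a staged pipeline: project/filter to (date, action) pairs, dedupe dates in first-appearance order, then count each of the three actions per date with list.count scans.
import Mathlib
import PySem

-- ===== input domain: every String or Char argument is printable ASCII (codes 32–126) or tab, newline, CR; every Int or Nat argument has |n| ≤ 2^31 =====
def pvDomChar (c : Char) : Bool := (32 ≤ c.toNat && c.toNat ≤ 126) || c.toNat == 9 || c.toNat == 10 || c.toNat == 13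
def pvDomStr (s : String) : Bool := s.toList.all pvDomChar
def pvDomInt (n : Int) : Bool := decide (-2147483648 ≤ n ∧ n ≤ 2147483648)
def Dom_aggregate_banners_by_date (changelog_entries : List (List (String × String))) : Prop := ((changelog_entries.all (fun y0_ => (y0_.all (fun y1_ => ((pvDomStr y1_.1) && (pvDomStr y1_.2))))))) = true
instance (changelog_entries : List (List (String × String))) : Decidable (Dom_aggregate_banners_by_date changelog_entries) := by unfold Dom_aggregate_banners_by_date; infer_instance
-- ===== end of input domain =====

-- B replaces A's single-pass defaultdict increment with a staged pipeline: project/filter to (date, action) pairs, dedupe dates in first-appearance order, then count the three actions per date (alternative, similar cost).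


-- entry.get(k) with '' for a missing key (both programs only test truthiness / use the value)
def pvGet (e : List (String × String)) (k : String) : String :=
  (PySem.Dict.ofList e).getD k ""

-- the fresh three-key dict {'banner-start': 0, 'banner-update': 0, 'banner-end': 0}
def pvFresh : PySem.Dict String Int :=
  PySem.Dict.mk [("banner-start", 0), ("banner-update", 0), ("banner-end", 0)]

-- ===== PORT A =====
def aggregate_banners_by_date (changelog_entries : List (List (String × String))) : List (String × List (String × Int)) :=
  let result := changelog_entries.foldl (fun result entry =>
    let date := pvGet entry "date"
    let banner_action := pvGet entry "banner_action"
    if date ≠ "" ∧ banner_action ≠ "" then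
      -- result[date][banner_action] += 1 (defaultdict materialises the default dict)
      result.insert date ((result.getD date pvFresh).modify banner_action 0 (· + 1))
    else result) (PySem.Dict.empty : PySem.Dict String (PySem.Dict String Int))
  result.items.map (fun p => (p.1, p.2.items))

-- ===== PORT B =====
def aggregate_banners_by_date_alt (changelog_entries : List (List (String × String))) : List (String × List (String × Int)) :=
  let pairs := (changelog_entries.map (fun e => (pvGet e "date", pvGet e "banner_action"))).filter
    (fun p => decide (p.1 ≠ "" ∧ p.2 ≠ ""))
  let dates := PySem.List.dedup (pairs.map Prod.fst)   -- list(dict.fromkeys(...))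
  dates.map (fun d =>
    let acts := (pairs.filter (fun p => p.1 == d)).map Prod.snd
    (d, [("banner-start", (acts.count "banner-start" : Int)),
         ("banner-update", (acts.count "banner-update" : Int)),
         ("banner-end", (acts.count "banner-end" : Int))]))

-- ===== PRECONDITION & SPEC =====
-- Pre_ excludes exactly the inputs on which A raises KeyError: an entry whose date and
-- banner_action are both truthy but whose banner_action is none of the three known keys.
def Pre_aggregate_banners_by_date (changelog_entries : List (List (String × String))) : Prop :=
  (changelog_entries.all (fun e =>
    (pvGet e "date" == "") || (pvGet e "banner_action" == "") ||
    (pvGet e "banner_action" == "banner-start") || (pvGet e "banner_action" == "banner-update") ||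
    (pvGet e "banner_action" == "banner-end"))) = true
instance (changelog_entries : List (List (String × String))) : Decidable (Pre_aggregate_banners_by_date changelog_entries) := by unfold Pre_aggregate_banners_by_date; infer_instance

def pvWitness_aggregate_banners_by_date : (List (List (String × String))) :=
  [[("date", "2024-01-01"), ("banner_action", "banner-start")],
   [("date", "2024-01-02"), ("banner_action", "banner-end")]]

def Spec_aggregate_banners_by_date (changelog_entries : List (List (String × String))) (out : List (String × List (String × Int))) : Prop := out = aggregate_banners_by_date_alt changelog_entries
instance (changelog_entries : List (List (String × String))) (out : List (String × List (String × Int))) : Decidable (Spec_aggregate_banners_by_date changelog_entries out) := by unfold Spec_aggregate_banners_by_date; infer_instance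

-- ===== CLAIM (what is proved, stated in full; the proofs are below) =====
def Claim_equal_aggregate_banners_by_date : Prop := ∀ (changelog_entries : List (List (String × String))), Dom_aggregate_banners_by_date changelog_entries → Pre_aggregate_banners_by_date changelog_entries → Spec_aggregate_banners_by_date changelog_entries (aggregate_banners_by_date changelog_entries)

-- ===== LEMMAS AND PROOFS =====

-- the projected/filtered (date, action) pairs both programs effectively process
def pvPairs (es : List (List (String × String))) : List (String × String) :=
  (es.map (fun e => (pvGet e "date", pvGet e "banner_action"))).filter
    (fun p => decide (p.1 ≠ "" ∧ p.2 ≠ ""))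

-- A's entry loop is the pair loop over pvPairs
lemma pvFoldA_eq (es : List (List (String × String)))
    (r : PySem.Dict String (PySem.Dict String Int)) :
    es.foldl (fun result entry =>
      let date := pvGet entry "date"
      let banner_action := pvGet entry "banner_action"
      if date ≠ "" ∧ banner_action ≠ "" then
        result.insert date ((result.getD date pvFresh).modify banner_action 0 (· + 1))
      else result) r
    = (pvPairs es).foldl
        (fun result p => result.modify p.1 pvFresh (fun c => c.modify p.2 0 (· + 1))) r := by
  induction es generalizing r with
  | nil => rfl
  | cons e es ih =>
    simp only [pvPairs] at ih ⊢
    simp only [List.map_cons, List.filter_cons, List.foldl_cons]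
    by_cases h : pvGet e "date" ≠ "" ∧ pvGet e "banner_action" ≠ ""
    · rw [if_pos h, if_pos (decide_eq_true h), List.foldl_cons, ih]; rfl
    · rw [if_neg h, if_neg (by simpa using h), ih]

-- per-date lookup of the outer modify loop: the actions at that date, folded from the default
lemma pvGetD_fold (xs : List (String × String)) (r : PySem.Dict String (PySem.Dict String Int))
    (d : String) :
    (xs.foldl (fun result p => result.modify p.1 pvFresh (fun c => c.modify p.2 0 (· + 1))) r).getD d pvFresh
    = ((xs.filter (fun p => p.1 == d)).map Prod.snd).foldl
        (fun c a => c.modify a 0 (· + 1)) (r.getD d pvFresh) := by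
  induction xs generalizing r with
  | nil => rfl
  | cons p xs ih =>
    simp only [List.foldl_cons, List.filter_cons, ih]
    by_cases h : p.1 = d
    · simp [h]
    · have : (p.1 == d) = false := by simp [h]
      rw [this]
      simp only [Bool.false_eq_true, if_false]
      rw [PySem.Dict.getD_modify]
      simp [Ne.symm h]

-- modify on the literal three-key dict, one lemma per known key
lemma pvM1 (x y z : Int) : (PySem.Dict.mk [("banner-start", x), ("banner-update", y), ("banner-end", z)]).modify "banner-start" 0 (· + 1) = PySem.Dict.mk [("banner-start", x + 1), ("banner-update", y), ("banner-end", z)] := rfl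
lemma pvM2 (x y z : Int) : (PySem.Dict.mk [("banner-start", x), ("banner-update", y), ("banner-end", z)]).modify "banner-update" 0 (· + 1) = PySem.Dict.mk [("banner-start", x), ("banner-update", y + 1), ("banner-end", z)] := rfl
lemma pvM3 (x y z : Int) : (PySem.Dict.mk [("banner-start", x), ("banner-update", y), ("banner-end", z)]).modify "banner-end" 0 (· + 1) = PySem.Dict.mk [("banner-start", x), ("banner-update", y), ("banner-end", z + 1)] := rfl

-- counting the three known actions into the literal three-key dict
lemma pvCnt3 (acts : List String)
    (h : ∀ a ∈ acts, a = "banner-start" ∨ a = "banner-update" ∨ a = "banner-end") :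
    ∀ (x y z : Int),
    (acts.foldl (fun c a => c.modify a 0 (· + 1))
        (PySem.Dict.mk [("banner-start", x), ("banner-update", y), ("banner-end", z)])).items
    = [("banner-start", x + acts.count "banner-start"),
       ("banner-update", y + acts.count "banner-update"),
       ("banner-end", z + acts.count "banner-end")] := by
  induction acts with
  | nil => simp
  | cons a acts ih =>
    intro x y z
    have ha := h a (List.mem_cons_self ..)
    have h' : ∀ a ∈ acts, a = "banner-start" ∨ a = "banner-update" ∨ a = "banner-end" :=
      fun b hb => h b (List.mem_cons_of_mem _ hb)
    rcases ha with ha | ha | ha <;> subst ha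
    · rw [List.foldl_cons, pvM1, ih h' (x + 1) y z]
      simp; omega
    · rw [List.foldl_cons, pvM2, ih h' x (y + 1) z]
      simp; omega
    · rw [List.foldl_cons, pvM3, ih h' x y (z + 1)]
      simp; omega

-- actions collected at a date are among the three known keys, given Pre_
lemma pvActsKnown (es : List (List (String × String)))
    (hpre : Pre_aggregate_banners_by_date es) (d : String) :
    ∀ a ∈ (((pvPairs es).filter (fun p => p.1 == d)).map Prod.snd),
      a = "banner-start" ∨ a = "banner-update" ∨ a = "banner-end" := by
  intro a ha
  simp only [List.mem_map, List.mem_filter, pvPairs] at ha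
  obtain ⟨p, ⟨hp, _⟩, rfl⟩ := ha
  obtain ⟨⟨e, he, rfl⟩, hcond⟩ := hp
  simp only [decide_eq_true_eq] at hcond
  unfold Pre_aggregate_banners_by_date at hpre
  rw [List.all_eq_true] at hpre
  have := hpre e he
  simp only [Bool.or_eq_true, beq_iff_eq] at this
  rcases this with ((((h|h)|h)|h)|h)
  · exact absurd h hcond.1
  · exact absurd h hcond.2
  · exact Or.inl h
  · exact Or.inr (Or.inl h)
  · exact Or.inr (Or.inr h)

-- ===== VERDICT (by name: the statement is the Claim_ definition above) =====
theorem aggregate_banners_by_date_spec : Claim_equal_aggregate_banners_by_date := by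
  intro es _ hpre
  unfold Spec_aggregate_banners_by_date aggregate_banners_by_date aggregate_banners_by_date_alt
  simp only []
  rw [pvFoldA_eq]
  set D := (pvPairs es).foldl
    (fun result p => result.modify p.1 pvFresh (fun c => c.modify p.2 0 (· + 1)))
    (PySem.Dict.empty : PySem.Dict String (PySem.Dict String Int)) with hD
  have hnd : D.keys.Nodup := by
    rw [hD]
    exact PySem.Dict.nodup_keys_foldl_modify_key _ _ _ _ _ PySem.Dict.nodup_keys_empty
  have hkeys : D.keys = PySem.List.dedup ((pvPairs es).map Prod.fst) := by
    rw [hD, PySem.Dict.keys_foldl_modify_key]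
    simp [PySem.Dict.keys_empty, PySem.Set.update_nil_left, PySem.List.dedup_eq_ofList]
  rw [PySem.Dict.items_eq_map_keys D hnd pvFresh, hkeys, List.map_map]
  apply List.map_congr_left
  intro d _
  simp only [Function.comp]
  congr 1
  rw [hD, pvGetD_fold, PySem.Dict.getD_empty]
  have := pvCnt3 _ (pvActsKnown es hpre d) 0 0 0
  rw [show (pvFresh = PySem.Dict.mk [("banner-start", 0), ("banner-update", 0), ("banner-end", 0)]) from rfl, this]
  simp [pvPairs]
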